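-- pv_equiv track=rewrite | github.com/Ddanceanu/osint---regional---security---monitor | app/processing/normalizer.py | sort_documents_by_date
-- ===== SOURCE A (Python) =====
-- def sort_documents_by_date(documents: list[dict]) -> list[dict]:
--     """
--     Returns documents sorted by publication_date_iso in descending order.
--
--     Documents without a valid ISO date are placed at the end.
--     """
--
--     documents_with_date = []
--     documents_without_date = []
--
--     for doc in documents:
--         if doc.get("publication_date_iso", ""):
--             documents_with_date.append(doc)
--         else:
--             documents_without_date.append(doc)
--
--     documents_with_date.sort(
--         key=lambda doc: doc["publication_date_iso"],
--         reverse=True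
--     )
--
--     return documents_with_date + documents_without_date
-- ===== SOURCE B (Python) =====
-- def sort_documents_by_date(documents: list[dict]) -> list[dict]:
--     """Single stable sort: undated docs get key "" which sorts last under reverse=True."""
--     return sorted(documents, key=lambda d: d.get("publication_date_iso") or "", reverse=True)
-- ===== Notes on version B (the rewrite author's own statement) =====
-- stated objective: simpler
-- what changed: Replaces the partition-into-two-lists + sort + concatenate structure with one stable reverse sort whose key maps missing/empty dates to "", which sorts to the end; stability keeps undated docs in original order.
import Mathlib
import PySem

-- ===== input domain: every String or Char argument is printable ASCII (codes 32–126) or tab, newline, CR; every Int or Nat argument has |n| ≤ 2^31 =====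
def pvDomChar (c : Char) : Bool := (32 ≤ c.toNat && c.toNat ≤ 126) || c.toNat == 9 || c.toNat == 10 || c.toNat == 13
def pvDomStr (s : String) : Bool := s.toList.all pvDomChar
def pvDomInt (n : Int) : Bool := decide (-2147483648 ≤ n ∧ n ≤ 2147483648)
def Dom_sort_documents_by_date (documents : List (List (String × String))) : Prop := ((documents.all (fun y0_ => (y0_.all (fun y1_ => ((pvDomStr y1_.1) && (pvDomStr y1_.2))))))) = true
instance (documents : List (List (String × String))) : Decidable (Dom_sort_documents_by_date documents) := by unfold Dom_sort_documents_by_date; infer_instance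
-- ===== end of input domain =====

-- B replaces A's partition + sort + concatenate with one stable reverse sort (undated → key ""): simpler decomposition, same cost.

-- ===== PORT A =====
-- doc.get("publication_date_iso", "") / doc["publication_date_iso"]; for the sort the key is always
-- present (the doc was put in documents_with_date because get was non-empty), so getD "" is exact there.
def pvDateKey (doc : List (String × String)) : String :=
  PySem.Dict.getD (PySem.Dict.mk doc) "publication_date_iso" ""

def sort_documents_by_date (documents : List (List (String × String))) : List (List (String × String)) :=
  let part := documents.foldl
    (fun (acc : List (List (String × String)) × List (List (String × String))) doc =>
      if pvDateKey doc ≠ "" then (acc.1 ++ [doc], acc.2) else (acc.1, acc.2 ++ [doc]))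
    ([], [])
  PySem.List.sorted part.1 pvDateKey true ++ part.2

-- ===== PORT B =====
-- sorted(documents, key=lambda d: d.get("publication_date_iso") or "", reverse=True)
def sort_documents_by_date_alt (documents : List (List (String × String))) : List (List (String × String)) :=
  PySem.List.sorted documents (fun d => PySem.Dict.getD (PySem.Dict.mk d) "publication_date_iso" "") true

-- ===== PRECONDITION & SPEC =====
def Spec_sort_documents_by_date (documents : List (List (String × String))) (out : List (List (String × String))) : Prop := out = sort_documents_by_date_alt documents
instance (documents : List (List (String × String))) (out : List (List (String × String))) : Decidable (Spec_sort_documents_by_date documents out) := by unfold Spec_sort_documents_by_date; infer_instance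

-- ===== CLAIM (what is proved, stated in full; the proofs are below) =====
def Claim_equal_sort_documents_by_date : Prop := ∀ (documents : List (List (String × String))), Dom_sort_documents_by_date documents → Spec_sort_documents_by_date documents (sort_documents_by_date documents)

-- ===== LEMMAS AND PROOFS =====

theorem pv_not_lt_empty (s : String) : ¬ s < "" := by
  simp [String.lt_iff_toList_lt]

theorem pv_empty_lt (s : String) (h : s ≠ "") : "" < s := by
  rw [String.lt_iff_toList_lt]
  cases hs : s.toList with
  | nil => exact absurd (String.toList_eq_nil_iff.mp hs) h
  | cons c t => exact List.nil_lt_cons c t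

-- A's partition loop, characterised by two filters.
theorem pv_partition (xs : List (List (String × String)))
    (a b : List (List (String × String))) :
    xs.foldl
      (fun (acc : List (List (String × String)) × List (List (String × String))) doc =>
        if pvDateKey doc ≠ "" then (acc.1 ++ [doc], acc.2) else (acc.1, acc.2 ++ [doc]))
      (a, b)
    = (a ++ xs.filter (fun d => pvDateKey d ≠ ""), b ++ xs.filter (fun d => ¬ pvDateKey d ≠ "")) := by
  induction xs generalizing a b with
  | nil => simp
  | cons x xs ih =>
    rw [List.foldl_cons]
    by_cases h : pvDateKey x ≠ "" <;>
      simp only [h, if_neg, not_false_iff] <;>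
      rw [ih] <;> simp [List.filter_cons, h]

-- insertBy distributes over ++ when x goes before everything in the tail.
theorem pv_insertBy_append (before : List (String × String) → List (String × String) → Bool)
    (x : List (String × String)) (F U : List (List (String × String)))
    (hU : ∀ u ∈ U, before x u = true) :
    PySem.List.insertBy before x (F ++ U) = PySem.List.insertBy before x F ++ U := by
  induction F with
  | nil =>
    cases U with
    | nil => simp [PySem.List.insertBy]
    | cons u us => simp [PySem.List.insertBy, hU u (by simp)]
  | cons f F ih =>
    by_cases h : before x f = true <;> simp [PySem.List.insertBy, h, ih]

-- Core invariant: the reverse insertion sort of xs is the reverse insertion sort of the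
-- dated part followed by the undated part in original order.
theorem pv_sort_split (xs : List (List (String × String))) :
    xs.foldl (fun acc x => PySem.List.insertBy (fun a b => decide (pvDateKey b < pvDateKey a)) x acc) []
    = (xs.filter (fun d => pvDateKey d ≠ "")).foldl
        (fun acc x => PySem.List.insertBy (fun a b => decide (pvDateKey b < pvDateKey a)) x acc) []
      ++ xs.filter (fun d => ¬ pvDateKey d ≠ "") := by
  induction xs using List.reverseRecOn with
  | nil => simp
  | append_singleton xs x ih =>
    rw [List.foldl_append, List.foldl_cons, List.foldl_nil, ih]
    by_cases h : pvDateKey x ≠ ""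
    · rw [pv_insertBy_append _ _ _ _ (fun u hu => ?_),
        List.filter_append, List.filter_append]
      · simp [h, List.foldl_append]
      · have hu0 : pvDateKey u = "" := by
          have := List.of_mem_filter hu
          simpa using this
        simp [hu0, pv_empty_lt _ h]
    · have hx : pvDateKey x = "" := by simpa using h
      rw [PySem.List.insertBy_of_forall_not_before _ _ _ (fun y _ => ?_)]
      · simp [hx, List.filter_append, List.append_assoc]
      · simp [hx, pv_not_lt_empty (pvDateKey y)]

-- ===== VERDICT (by name: the statement is the Claim_ definition above) =====
theorem sort_documents_by_date_spec : Claim_equal_sort_documents_by_date := by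
  intro documents _
  unfold Spec_sort_documents_by_date sort_documents_by_date sort_documents_by_date_alt
  rw [show (fun d => PySem.Dict.getD (PySem.Dict.mk d) "publication_date_iso" "") = pvDateKey from rfl]
  rw [pv_partition documents [] []]
  simp only [List.nil_append]
  rw [PySem.List.sorted_rev_eq_foldl_insertBy, PySem.List.sorted_rev_eq_foldl_insertBy]
  conv_rhs => rw [pv_sort_split documents]
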